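-- pv_equiv track=rewrite | github.com/StarSein/BaekJoon | 백준/Gold/2262. 토너먼트 만들기/토너먼트 만들기.py | solution
-- ===== SOURCE A (Python) =====
-- from typing import List
--
-- def solution(n: int, ranks: List[int]) -> int:
--     dp = [[[0, 0] for j in range(n)] for i in range(n)]
--
--     for i in range(n):
--         dp[i][i][1] = ranks[i]
--
--     for i in range(n - 1):
--         dp[i][i + 1][0] = abs(ranks[i] - ranks[i + 1])
--         dp[i][i + 1][1] = min(ranks[i], ranks[i + 1])
--
--     def func(l: int, r: int) -> List[int]:
--         if dp[l][r][1] != 0: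
--             return dp[l][r]
--
--         min_diff_sum = 1000000
--         min_rank = 10000
--         for k in range(l, r):
--             diff_sum1, rank1 = func(l, k)
--             diff_sum2, rank2 = func(k + 1, r)
--             cur_diff_sum = diff_sum1 + diff_sum2 + abs(rank1 - rank2)
--             cur_rank = min(rank1, rank2)
--             if cur_diff_sum < min_diff_sum:
--                 min_diff_sum = cur_diff_sum
--                 min_rank = cur_rank
--             elif cur_diff_sum == min_diff_sum and cur_rank < min_rank:
--                 min_rank = cur_rank
--         dp[l][r][0] = min_diff_sum
--         dp[l][r][1] = min_rank
--         return dp[l][r]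
--
--     return func(0, n - 1)[0]
-- ===== SOURCE B (Python) =====
-- from typing import List
--
-- def solution(n: int, ranks: List[int]) -> int:
--     dp = [[(0, 0)] * n for _ in range(n)]
--     for i in range(n):
--         dp[i][i] = (0, ranks[i])
--     for i in range(n - 1):
--         dp[i][i + 1] = (abs(ranks[i] - ranks[i + 1]), min(ranks[i], ranks[i + 1]))
--     for length in range(3, n + 1):
--         for l in range(n - length + 1):
--             r = l + length - 1
--             best = (1000000, 10000)
--             for k in range(l, r):
--                 d1, r1 = dp[l][k]
--                 d2, r2 = dp[k + 1][r]
--                 best = min(best, (d1 + d2 + abs(r1 - r2), min(r1, r2)))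
--             dp[l][r] = best
--     return dp[0][n - 1][0]
-- ===== Notes on version B (the rewrite author's own statement) =====
-- stated objective: alternative
-- what changed: Replaces A's top-down memoized recursion (with its dp[l][r][1]!=0 'computed' flag and dp-table side effects) by an iterative bottom-up interval DP filled by increasing interval length, with Python's tuple min as the tie-break.
-- intended difference: On inputs whose first n ranks contain a 0, A's memo test dp[l][r][1] != 0 treats computed entries as uncomputed (a lone rank-0 player yields the 1000000 sentinel instead of 0); B returns the true minimal rank-difference sum, the intended value. — e.g. on solution(1, [0]): A returns 1000000, B returns 0
import Mathlib
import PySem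

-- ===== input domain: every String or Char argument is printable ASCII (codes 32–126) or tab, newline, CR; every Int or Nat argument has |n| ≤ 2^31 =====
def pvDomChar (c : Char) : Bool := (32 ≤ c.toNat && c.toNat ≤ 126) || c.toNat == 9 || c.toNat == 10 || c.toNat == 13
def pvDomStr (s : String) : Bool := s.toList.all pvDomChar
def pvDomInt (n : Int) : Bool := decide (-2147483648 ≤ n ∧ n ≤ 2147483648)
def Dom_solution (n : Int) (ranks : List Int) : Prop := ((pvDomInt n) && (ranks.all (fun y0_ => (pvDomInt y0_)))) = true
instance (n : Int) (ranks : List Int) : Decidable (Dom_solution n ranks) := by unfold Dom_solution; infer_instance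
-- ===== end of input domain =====

-- B replaces A's top-down memoized recursion by an iterative bottom-up interval DP over
-- interval length (same cost class); A's memo flag 'dp[l][r][1] != 0' misfires when a rank is
-- 0, so those inputs are stated as the intended difference D_ below.

-- dp[l][r] := v (the mutable 2D table of pairs modelled as a function, pointwise update); the
-- two Pythons share their two initialisation loops verbatim, so the ports share pvUpd/pvInitA
def pvUpd (dp : Int → Int → Int × Int) (l r : Int) (v : Int × Int) : Int → Int → Int × Int :=
  fun i j => if i = l ∧ j = r then v else dp i j

-- the two shared init loops: dp[i][i][1] = ranks[i]; dp[i][i+1] = (abs diff, min)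
def pvInitA (g : Int → Int) (n : Int) : Int → Int → Int × Int :=
  let d1 := (PySem.List.pyRange 0 n 1).foldl (fun dp i => pvUpd dp i i (0, g i)) (fun _ _ => (0, 0))
  (PySem.List.pyRange 0 (n - 1) 1).foldl
    (fun dp i => pvUpd dp i (i + 1) (|g i - g (i + 1)|, min (g i) (g (i + 1)))) d1

-- ===== PORT A =====
-- A's update of (min_diff_sum, min_rank): 'if <' updates both; 'elif == and rank <' rank only
def pvStepA (best cur : Int × Int) : Int × Int :=
  if cur.1 < best.1 then cur
  else if cur.1 = best.1 ∧ cur.2 < best.2 then (best.1, cur.2)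
  else best

-- func(l, r) with the dp table threaded through; fuel only makes the recursion total
def pvFuncA (fuel : Nat) (dp : Int → Int → Int × Int) (l r : Int) :
    (Int → Int → Int × Int) × (Int × Int) :=
  match fuel with
  | 0 => (dp, dp l r)
  | fuel + 1 =>
    if (dp l r).2 ≠ 0 then (dp, dp l r)
    else
      let res := (PySem.List.pyRange l r 1).foldl (fun st k =>
        let s1 := pvFuncA fuel st.1 l k
        let s2 := pvFuncA fuel s1.1 (k + 1) r
        let cur := (s1.2.1 + s2.2.1 + |s1.2.2 - s2.2.2|, min s1.2.2 s2.2.2)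
        (s2.1, pvStepA st.2 cur)) (dp, ((1000000 : Int), (10000 : Int)))
      (pvUpd res.1 l r res.2, res.2)

def solution (n : Int) (ranks : List Int) : Int :=
  let g := fun i => PySem.List.pyGetD ranks i 0
  (pvFuncA ((n - 1).toNat + 1) (pvInitA g n) 0 (n - 1)).2.1

-- ===== PORT B =====
-- B's update: best = min(best, cur), Python tuple (lexicographic) min
def pvMin2 (best cur : Int × Int) : Int × Int :=
  if cur.1 < best.1 ∨ (cur.1 = best.1 ∧ cur.2 < best.2) then cur else best

def pvGet2 (dp : List (List (Int × Int))) (i j : Int) : Int × Int :=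
  (dp.getD i.toNat []).getD j.toNat (0, 0)

def pvSet2 (dp : List (List (Int × Int))) (i j : Int) (v : Int × Int) : List (List (Int × Int)) :=
  dp.set i.toNat ((dp.getD i.toNat []).set j.toNat v)

def solution_alt (n : Int) (ranks : List Int) : Int :=
  let g := fun i => PySem.List.pyGetD ranks i 0
  let dp0 := (PySem.List.pyRange 0 n 1).map
    (fun _ => (PySem.List.pyRange 0 n 1).map (fun _ => ((0 : Int), (0 : Int))))
  let dp1 := (PySem.List.pyRange 0 n 1).foldl (fun dp i => pvSet2 dp i i (0, g i)) dp0
  let dp2 := (PySem.List.pyRange 0 (n - 1) 1).foldl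
    (fun dp i => pvSet2 dp i (i + 1) (|g i - g (i + 1)|, min (g i) (g (i + 1)))) dp1
  let tb := (PySem.List.pyRange 3 (n + 1) 1).foldl (fun dp len =>
      (PySem.List.pyRange 0 (n - len + 1) 1).foldl (fun dp l =>
        let r := l + len - 1
        let best := (PySem.List.pyRange l r 1).foldl (fun best k =>
            let p := pvGet2 dp l k
            let q := pvGet2 dp (k + 1) r
            pvMin2 best (p.1 + q.1 + |p.2 - q.2|, min p.2 q.2)) ((1000000 : Int), (10000 : Int))
        pvSet2 dp l r best) dp) dp2
  (pvGet2 tb 0 (n - 1)).1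

-- ===== PRECONDITION & SPEC =====
-- Pre_ excludes exactly the inputs where A raises IndexError: n < 1 (indexing the empty dp
-- table) or n > len(ranks) (ranks[i] out of range)
def Pre_solution (n : Int) (ranks : List Int) : Prop := 1 ≤ n ∧ n ≤ ranks.length
instance (n : Int) (ranks : List Int) : Decidable (Pre_solution n ranks) := by
  unfold Pre_solution; infer_instance

def pvWitness_solution : Int × List Int := (3, [3, 1, 2])

-- On inputs whose first n ranks contain 0, A's memo test 'dp[l][r][1] != 0' mistakes
-- uncomputed entries for computed ones and returns accidental sentinel-driven values (e.g.
-- 1000000 for the single rank-0 player); B returns the true minimal rank-difference sum,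
-- the intended value.
def D_solution (n : Int) (ranks : List Int) : Prop := 0 ∈ ranks.take n.toNat
instance (n : Int) (ranks : List Int) : Decidable (D_solution n ranks) := by
  unfold D_solution; infer_instance

def Spec_solution (n : Int) (ranks : List Int) (out : Int) : Prop :=
  ¬ D_solution n ranks → out = solution_alt n ranks
instance (n : Int) (ranks : List Int) (out : Int) : Decidable (Spec_solution n ranks out) := by
  unfold Spec_solution; infer_instance

def pvDiffWitness_solution : Int × List Int := (1, [0])
def pvDiffWitnessOut_solution : Int × Int := (1000000, 0)

-- ===== CLAIM (what is proved, stated in full; the proofs are below) =====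
def Claim_unchanged_solution : Prop := ∀ (n : Int) (ranks : List Int), Dom_solution n ranks →
  Pre_solution n ranks → Spec_solution n ranks (solution n ranks)
def Claim_changed_solution : Prop :=
  Dom_solution (pvDiffWitness_solution.1) (pvDiffWitness_solution.2) ∧
  Pre_solution (pvDiffWitness_solution.1) (pvDiffWitness_solution.2) ∧
  D_solution (pvDiffWitness_solution.1) (pvDiffWitness_solution.2) ∧
  solution (pvDiffWitness_solution.1) (pvDiffWitness_solution.2) = pvDiffWitnessOut_solution.1 ∧
  solution_alt (pvDiffWitness_solution.1) (pvDiffWitness_solution.2) = pvDiffWitnessOut_solution.2 ∧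
  pvDiffWitnessOut_solution.1 ≠ pvDiffWitnessOut_solution.2

-- ===== LEMMAS AND PROOFS =====

-- the combination step both programs perform on a split (diff sums added, ranks merged)
def pvComb (p q : Int × Int) : Int × Int := (p.1 + q.1 + |p.2 - q.2|, min p.2 q.2)

-- the pure interval recurrence both programs compute (fuel-indexed, then at exact depth)
def pvF (g : Int → Int) : Nat → Int → Int → Int × Int
  | 0, l, _ => (0, g l)
  | fuel + 1, l, r =>
    if r ≤ l then (0, g l)
    else if r = l + 1 then (|g l - g r|, min (g l) (g r))
    else (PySem.List.pyRange l r 1).foldl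
        (fun best k => pvStepA best (pvComb (pvF g fuel l k) (pvF g fuel (k + 1) r)))
        (1000000, 10000)

def pvG (g : Int → Int) (l r : Int) : Int × Int := pvF g (r - l).toNat l r

lemma pvF_succ (g : Int → Int) (fuel : Nat) (l r : Int) :
    pvF g (fuel + 1) l r =
      (if r ≤ l then (0, g l)
       else if r = l + 1 then (|g l - g r|, min (g l) (g r))
       else (PySem.List.pyRange l r 1).foldl
          (fun best k => pvStepA best (pvComb (pvF g fuel l k) (pvF g fuel (k + 1) r)))
          (1000000, 10000)) := rfl

lemma pvMin2_eq_stepA (b c : Int × Int) : pvMin2 b c = pvStepA b c := by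
  obtain ⟨b1, b2⟩ := b; obtain ⟨c1, c2⟩ := c
  simp only [pvMin2, pvStepA]
  split_ifs <;> simp_all

lemma pvF_eq_pvG (g : Int → Int) : ∀ fuel l r, (r - l).toNat ≤ fuel →
    pvF g fuel l r = pvG g l r := by
  intro fuel
  induction fuel using Nat.strong_induction_on with
  | _ fuel IH =>
    intro l r h
    unfold pvG
    match fuel, h with
    | 0, h => have h0 : (r - l).toNat = 0 := Nat.le_zero.mp h; rw [h0]
    | Nat.succ f, h =>
      by_cases hrl : r ≤ l
      · have h0 : (r - l).toNat = 0 := by omega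
        rw [h0]; simp [pvF, hrl]
      · by_cases hp : r = l + 1
        · have h1 : (r - l).toNat = 1 := by omega
          rw [h1]; simp [pvF, hp]
        · obtain ⟨e, he⟩ : ∃ e, (r - l).toNat = e + 1 + 1 := ⟨(r - l).toNat - 2, by omega⟩
          rw [he, pvF_succ, pvF_succ, if_neg hrl, if_neg hrl, if_neg hp, if_neg hp]
          apply PySem.List.foldl_congr_mem
          intro acc k hk
          rw [PySem.List.mem_pyRange_one] at hk
          rw [IH f (by omega) l k (by omega), IH (e + 1) (by omega) l k (by omega),
            IH f (by omega) (k + 1) r (by omega), IH (e + 1) (by omega) (k + 1) r (by omega)]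

lemma pvG_pair (g : Int → Int) (l r : Int) (h : r = l + 1) :
    pvG g l r = (|g l - g r|, min (g l) (g r)) := by
  rw [h]
  have h1 : (l + 1 - l).toNat = 1 := by omega
  rw [pvG, h1, pvF_succ, if_neg (by omega), if_pos rfl]

lemma pvG_diag (g : Int → Int) (l r : Int) (h : r = l) : pvG g l r = (0, g l) := by
  rw [h]
  have h0 : (l - l).toNat = 0 := by omega
  rw [pvG, h0, pvF]

lemma pvG_unfold (g : Int → Int) (l r : Int) (h : l + 1 < r) :
    pvG g l r = (PySem.List.pyRange l r 1).foldl
      (fun best k => pvStepA best (pvComb (pvG g l k) (pvG g (k + 1) r))) (1000000, 10000) := by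
  obtain ⟨e, he⟩ : ∃ e, (r - l).toNat = e + 1 + 1 := ⟨(r - l).toNat - 2, by omega⟩
  rw [pvG, he, pvF_succ, if_neg (by omega : ¬ r ≤ l), if_neg (by omega : ¬ r = l + 1)]
  apply PySem.List.foldl_congr_mem
  intro acc k hk
  rw [PySem.List.mem_pyRange_one] at hk
  rw [pvF_eq_pvG g (e + 1) l k (by omega), pvF_eq_pvG g (e + 1) (k + 1) r (by omega)]

-- the no-zero-rank hypothesis (¬D_ under Pre_)
def pvNZ (g : Int → Int) (n : Int) : Prop := ∀ i : Int, 0 ≤ i → i < n → g i ≠ 0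

lemma pvG_rank_ne (g : Int → Int) (n : Int) (hNZ : pvNZ g n) :
    ∀ d l r, 0 ≤ l → l ≤ r → r < n → (r - l).toNat = d → (pvG g l r).2 ≠ 0 := by
  intro d
  induction d using Nat.strong_induction_on with
  | _ d IH =>
    intro l r hl hlr hr hd
    by_cases h0 : r = l
    · rw [pvG_diag g l r h0]; exact hNZ l hl (by omega)
    · by_cases h1 : r = l + 1
      · rw [pvG_pair g l r h1]
        rcases min_cases (g l) (g r) with ⟨hmin, _⟩ | ⟨hmin, _⟩ <;> rw [hmin]
        · exact hNZ l hl (by omega)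
        · exact hNZ r (by omega) hr
      · have h2 : l + 1 < r := by omega
        rw [pvG_unfold g l r h2]
        have aux : ∀ xs : List Int, (∀ k ∈ xs, l ≤ k ∧ k < r) → ∀ best : Int × Int,
            best.2 ≠ 0 →
            (xs.foldl (fun best k => pvStepA best (pvComb (pvG g l k) (pvG g (k + 1) r)))
              best).2 ≠ 0 := by
          intro xs
          induction xs with
          | nil => intro _ best hb; simpa using hb
          | cons k ks ih =>
            intro hmem best hb
            obtain ⟨hk1, hk2⟩ := hmem k List.mem_cons_self
            rw [List.foldl_cons]
            apply ih (fun x hx => hmem x (List.mem_cons_of_mem _ hx))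
            have hL : (pvG g l k).2 ≠ 0 :=
              IH (k - l).toNat (by omega) l k hl hk1 (by omega) rfl
            have hR : (pvG g (k + 1) r).2 ≠ 0 :=
              IH (r - (k + 1)).toNat (by omega) (k + 1) r (by omega) (by omega) hr rfl
            have hcur : (pvComb (pvG g l k) (pvG g (k + 1) r)).2 ≠ 0 := by
              simp only [pvComb]
              rcases min_cases (pvG g l k).2 (pvG g (k + 1) r).2 with ⟨hm, _⟩ | ⟨hm, _⟩ <;>
                rw [hm] <;> assumption
            simp only [pvStepA]
            split_ifs <;> simpa using (by first | exact hcur | exact hb)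
        apply aux
        · intro k hk; rw [PySem.List.mem_pyRange_one] at hk; exact hk
        · simp
-- A's table invariant: flagged entries are correct, length-1/2 entries stay at their init values
def pvInv (g : Int → Int) (n : Int) (dp : Int → Int → Int × Int) : Prop :=
  (∀ l r : Int, 0 ≤ l → l ≤ r → r < n → (dp l r).2 ≠ 0 → dp l r = pvG g l r) ∧
  (∀ l : Int, 0 ≤ l → l < n → dp l l = pvG g l l) ∧
  (∀ l : Int, 0 ≤ l → l + 1 < n → dp l (l + 1) = pvG g l (l + 1))

lemma pvFoldDiag (g : Int → Int) : ∀ (m : Nat) (dp : Int → Int → Int × Int) (x y : Int),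
    ((List.range m).foldl (fun dp (k : Nat) => pvUpd dp (k : Int) (k : Int) (0, g (k : Int))) dp) x y
      = if 0 ≤ x ∧ x < (m : Int) ∧ y = x then (0, g x) else dp x y := by
  intro m
  induction m with
  | zero =>
    intro dp x y
    rw [List.range_zero, List.foldl_nil, if_neg (by omega)]
  | succ m ih =>
    intro dp x y
    rw [List.range_succ, List.foldl_append, List.foldl_cons, List.foldl_nil]
    simp only [pvUpd]
    by_cases hx : x = (m : Int) ∧ y = (m : Int)
    · rw [if_pos hx, if_pos (by omega), hx.1]
    · rw [if_neg hx, ih]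
      by_cases hc : 0 ≤ x ∧ x < (m : Int) ∧ y = x
      · rw [if_pos hc, if_pos (by omega)]
      · rw [if_neg hc, if_neg (by omega)]

lemma pvFoldPair (g : Int → Int) : ∀ (m : Nat) (dp : Int → Int → Int × Int) (x y : Int),
    ((List.range m).foldl (fun dp (k : Nat) =>
        pvUpd dp (k : Int) ((k : Int) + 1)
          (|g (k : Int) - g ((k : Int) + 1)|, min (g (k : Int)) (g ((k : Int) + 1)))) dp) x y
      = if 0 ≤ x ∧ x < (m : Int) ∧ y = x + 1 then (|g x - g (x + 1)|, min (g x) (g (x + 1)))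
        else dp x y := by
  intro m
  induction m with
  | zero =>
    intro dp x y
    rw [List.range_zero, List.foldl_nil, if_neg (by omega)]
  | succ m ih =>
    intro dp x y
    rw [List.range_succ, List.foldl_append, List.foldl_cons, List.foldl_nil]
    simp only [pvUpd]
    by_cases hx : x = (m : Int) ∧ y = (m : Int) + 1
    · rw [if_pos hx, if_pos (by omega), hx.1]
    · rw [if_neg hx, ih]
      by_cases hc : 0 ≤ x ∧ x < (m : Int) ∧ y = x + 1
      · rw [if_pos hc, if_pos (by omega)]
      · rw [if_neg hc, if_neg (by omega)]

lemma pvInitA_eval (g : Int → Int) (n x y : Int) :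
    pvInitA g n x y =
      if 0 ≤ x ∧ x < n - 1 ∧ y = x + 1 then (|g x - g (x + 1)|, min (g x) (g (x + 1)))
      else if 0 ≤ x ∧ x < n ∧ y = x then (0, g x)
      else (0, 0) := by
  unfold pvInitA
  rw [PySem.List.pyRange_one, PySem.List.pyRange_one, List.foldl_map, List.foldl_map]
  simp only [zero_add, sub_zero]
  rw [pvFoldPair, pvFoldDiag]
  split_ifs <;> first | rfl | omega

lemma pvInv_init (g : Int → Int) (n : Int) : pvInv g n (pvInitA g n) := by
  refine ⟨?_, ?_, ?_⟩
  · intro l r hl hlr hr hflag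
    rw [pvInitA_eval] at hflag ⊢
    split_ifs at hflag ⊢ with h1 h2
    · rw [pvG_pair g l r h1.2.2, h1.2.2]
    · rw [pvG_diag g l r h2.2.2]
    · simp at hflag
  · intro l hl hn
    rw [pvInitA_eval, if_neg (by omega), if_pos (by omega), pvG_diag g l l rfl]
  · intro l hl hn
    rw [pvInitA_eval, if_pos (by omega), pvG_pair g l (l + 1) rfl]

lemma pvInv_upd (g : Int → Int) (n : Int) (dp : Int → Int → Int × Int) (l r : Int)
    (h : pvInv g n dp) : pvInv g n (pvUpd dp l r (pvG g l r)) := by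
  obtain ⟨h1, h2, h3⟩ := h
  refine ⟨?_, ?_, ?_⟩
  · intro a b ha hab hb hflag
    simp only [pvUpd] at hflag ⊢
    split_ifs at hflag ⊢ with hk
    · rw [← hk.1, ← hk.2]
    · exact h1 a b ha hab hb hflag
  · intro a ha hb
    simp only [pvUpd]
    split_ifs with hk
    · rw [← hk.1, ← hk.2]
    · exact h2 a ha hb
  · intro a ha hb
    simp only [pvUpd]
    split_ifs with hk
    · rw [← hk.1, ← hk.2]
    · exact h3 a ha hb

lemma pvFuncA_main (g : Int → Int) (n : Int) (hNZ : pvNZ g n) :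
    ∀ fuel l r dp, 0 ≤ l → l ≤ r → r < n → (r - l).toNat < fuel → pvInv g n dp →
      (pvFuncA fuel dp l r).2 = pvG g l r ∧ pvInv g n (pvFuncA fuel dp l r).1 := by
  intro fuel
  induction fuel with
  | zero => intro l r dp _ _ _ hf _; omega
  | succ fuel IH =>
    intro l r dp hl hlr hr hf hInv
    obtain ⟨h1, h2, h3⟩ := hInv
    simp only [pvFuncA]
    by_cases hflag : (dp l r).2 ≠ 0
    · rw [if_pos hflag]
      exact ⟨h1 l r hl hlr hr hflag, h1, h2, h3⟩
    · rw [if_neg hflag]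
      rw [not_not] at hflag
      have hne : l + 1 < r := by
        by_cases e1 : r = l
        · exfalso
          have hd := h2 l hl (by omega)
          have hrank := pvG_rank_ne g n hNZ (l - l).toNat l l hl le_rfl (by omega) rfl
          rw [e1, hd] at hflag; exact hrank hflag
        · by_cases e2 : r = l + 1
          · exfalso
            have hd := h3 l hl (by omega)
            have hrank :=
              pvG_rank_ne g n hNZ (l + 1 - l).toNat l (l + 1) hl (by omega) (by omega) rfl
            rw [e2, hd] at hflag; exact hrank hflag
          · omega
      have loop : ∀ xs : List Int, (∀ k ∈ xs, l ≤ k ∧ k < r) → ∀ dp0 best, pvInv g n dp0 →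
          (xs.foldl (fun st k =>
            let s1 := pvFuncA fuel st.1 l k
            let s2 := pvFuncA fuel s1.1 (k + 1) r
            let cur := (s1.2.1 + s2.2.1 + |s1.2.2 - s2.2.2|, min s1.2.2 s2.2.2)
            (s2.1, pvStepA st.2 cur)) (dp0, best)).2
            = xs.foldl (fun b k => pvStepA b (pvComb (pvG g l k) (pvG g (k + 1) r))) best
          ∧ pvInv g n (xs.foldl (fun st k =>
            let s1 := pvFuncA fuel st.1 l k
            let s2 := pvFuncA fuel s1.1 (k + 1) r
            let cur := (s1.2.1 + s2.2.1 + |s1.2.2 - s2.2.2|, min s1.2.2 s2.2.2)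
            (s2.1, pvStepA st.2 cur)) (dp0, best)).1 := by
        intro xs
        induction xs with
        | nil => intro _ dp0 best hInv0; exact ⟨rfl, hInv0⟩
        | cons k ks ih =>
          intro hmem dp0 best hInv0
          obtain ⟨hk1, hk2⟩ := hmem k List.mem_cons_self
          have c1 := IH l k dp0 hl hk1 (by omega) (by omega) hInv0
          have c2 := IH (k + 1) r (pvFuncA fuel dp0 l k).1 (by omega) (by omega) hr
            (by omega) c1.2
          simp only [List.foldl_cons, pvComb]
          rw [c1.1, c2.1]
          exact ih (fun x hx => hmem x (List.mem_cons_of_mem _ hx)) _ _ c2.2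
      have hmem : ∀ k ∈ PySem.List.pyRange l r 1, l ≤ k ∧ k < r := by
        intro k hk; rw [PySem.List.mem_pyRange_one] at hk; exact hk
      obtain ⟨lv, linv⟩ := loop _ hmem dp (1000000, 10000) ⟨h1, h2, h3⟩
      have hval : ((PySem.List.pyRange l r 1).foldl (fun st k =>
            let s1 := pvFuncA fuel st.1 l k
            let s2 := pvFuncA fuel s1.1 (k + 1) r
            let cur := (s1.2.1 + s2.2.1 + |s1.2.2 - s2.2.2|, min s1.2.2 s2.2.2)
            (s2.1, pvStepA st.2 cur)) (dp, (1000000, 10000))).2 = pvG g l r := by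
        rw [lv, pvG_unfold g l r hne]
      refine ⟨hval, ?_⟩
      have h' := pvInv_upd g n ((PySem.List.pyRange l r 1).foldl (fun st k =>
            let s1 := pvFuncA fuel st.1 l k
            let s2 := pvFuncA fuel s1.1 (k + 1) r
            let cur := (s1.2.1 + s2.2.1 + |s1.2.2 - s2.2.2|, min s1.2.2 s2.2.2)
            (s2.1, pvStepA st.2 cur)) (dp, (1000000, 10000))).1 l r linv
      rw [← hval] at h'
      exact h'

-- B's table: shape, update/lookup laws, and the bottom-up filling invariant
def pvShape (n : Int) (dp : List (List (Int × Int))) : Prop :=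
  dp.length = n.toNat ∧ ∀ row ∈ dp, row.length = n.toNat

lemma pvShape_set2 (n : Int) (dp : List (List (Int × Int))) (a b : Int) (v : Int × Int)
    (h : pvShape n dp) : pvShape n (pvSet2 dp a b v) := by
  obtain ⟨h1, h2⟩ := h
  by_cases hin : a.toNat < dp.length
  · constructor
    · simp [pvSet2, h1]
    · intro row hrow
      rcases List.mem_or_eq_of_mem_set hrow with hm | hm
      · exact h2 row hm
      · subst hm
        rw [List.length_set]
        have hg : dp.getD a.toNat [] = dp[a.toNat] := by
          rw [List.getD_eq_getElem?_getD, List.getElem?_eq_getElem hin]; rfl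
        rw [hg]
        exact h2 _ (List.getElem_mem hin)
  · unfold pvSet2
    rw [List.set_eq_of_length_le (by omega)]
    exact ⟨h1, h2⟩

lemma pvGetDset_eq {α : Type} (l : List α) (k : Nat) (x d : α) (h : k < l.length) :
    (l.set k x).getD k d = x := by
  rw [List.getD_eq_getElem?_getD, List.getElem?_set_self (by omega)]
  simp

lemma pvGetDset_ne {α : Type} (l : List α) (k m : Nat) (h : k ≠ m) (x d : α) :
    (l.set k x).getD m d = l.getD m d := by
  rw [List.getD_eq_getElem?_getD, List.getElem?_set_ne h, ← List.getD_eq_getElem?_getD]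

lemma pvGet2_set2 (n : Int) (dp : List (List (Int × Int))) (a b i j : Int) (v : Int × Int)
    (hsh : pvShape n dp) (h0a : 0 ≤ a) (ha : a < n) (h0b : 0 ≤ b) (hb : b < n)
    (h0i : 0 ≤ i) (h0j : 0 ≤ j) :
    pvGet2 (pvSet2 dp a b v) i j = if i = a ∧ j = b then v else pvGet2 dp i j := by
  obtain ⟨h1, h2⟩ := hsh
  have hain : a.toNat < dp.length := by omega
  have hrow : dp.getD a.toNat [] = dp[a.toNat] := by
    rw [List.getD_eq_getElem?_getD, List.getElem?_eq_getElem hain]; rfl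
  have hrowlen : dp[a.toNat].length = n.toNat := h2 _ (List.getElem_mem hain)
  by_cases hia : i = a
  · have hta : i.toNat = a.toNat := by omega
    unfold pvGet2 pvSet2
    rw [hta, pvGetDset_eq dp a.toNat _ [] hain, hrow]
    by_cases hjb : j = b
    · have htb : j.toNat = b.toNat := by omega
      rw [htb, pvGetDset_eq (dp[a.toNat]) b.toNat v (0, 0) (by omega), if_pos ⟨hia, hjb⟩]
    · rw [pvGetDset_ne (dp[a.toNat]) b.toNat j.toNat (by omega) v (0, 0), if_neg (by tauto)]
  · have hta : i.toNat ≠ a.toNat := by omega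
    unfold pvGet2 pvSet2
    rw [pvGetDset_ne dp a.toNat i.toNat (by omega) _ [], if_neg (by tauto)]

lemma pvShape_dp0 (n : Int) :
    pvShape n ((PySem.List.pyRange 0 n 1).map
      (fun _ => (PySem.List.pyRange 0 n 1).map (fun _ => ((0 : Int), (0 : Int))))) := by
  constructor
  · rw [List.length_map, PySem.List.length_pyRange_one]
    omega
  · intro row hrow
    rw [List.mem_map] at hrow
    obtain ⟨_, _, hrow⟩ := hrow
    rw [← hrow, List.length_map, PySem.List.length_pyRange_one]
    omega

lemma pvFoldDiag2 (g : Int → Int) (n : Int) : ∀ (m : Nat),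
    ∀ dp : List (List (Int × Int)), (m : Int) ≤ n → pvShape n dp →
    pvShape n ((List.range m).foldl (fun dp (k : Nat) => pvSet2 dp (k : Int) (k : Int) (0, g (k : Int))) dp) ∧
    ∀ x y : Int, 0 ≤ x → 0 ≤ y →
      pvGet2 ((List.range m).foldl (fun dp (k : Nat) => pvSet2 dp (k : Int) (k : Int) (0, g (k : Int))) dp) x y
        = if 0 ≤ x ∧ x < (m : Int) ∧ y = x then (0, g x) else pvGet2 dp x y := by
  intro m
  induction m with
  | zero =>
    intro dp _ hsh
    refine ⟨by simpa using hsh, ?_⟩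
    intro x y hx hy
    rw [List.range_zero, List.foldl_nil, if_neg (by omega)]
  | succ m ih =>
    intro dp hm hsh
    obtain ⟨ihs, ihe⟩ := ih dp (by omega) hsh
    rw [List.range_succ, List.foldl_append, List.foldl_cons, List.foldl_nil]
    refine ⟨pvShape_set2 n _ _ _ _ ihs, ?_⟩
    intro x y hx hy
    rw [pvGet2_set2 n _ (m : Int) (m : Int) x y _ ihs (by omega) (by omega) (by omega)
      (by omega) hx hy]
    by_cases hxm : x = (m : Int) ∧ y = (m : Int)
    · rw [if_pos hxm, if_pos (by omega), hxm.1]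
    · rw [if_neg hxm, ihe x y hx hy]
      by_cases hc : 0 ≤ x ∧ x < (m : Int) ∧ y = x
      · rw [if_pos hc, if_pos (by omega)]
      · rw [if_neg hc, if_neg (by omega)]

lemma pvFoldPair2 (g : Int → Int) (n : Int) : ∀ (m : Nat),
    ∀ dp : List (List (Int × Int)), (m : Int) ≤ n - 1 → pvShape n dp →
    pvShape n ((List.range m).foldl (fun dp (k : Nat) =>
      pvSet2 dp (k : Int) ((k : Int) + 1)
        (|g (k : Int) - g ((k : Int) + 1)|, min (g (k : Int)) (g ((k : Int) + 1)))) dp) ∧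
    ∀ x y : Int, 0 ≤ x → 0 ≤ y →
      pvGet2 ((List.range m).foldl (fun dp (k : Nat) =>
        pvSet2 dp (k : Int) ((k : Int) + 1)
          (|g (k : Int) - g ((k : Int) + 1)|, min (g (k : Int)) (g ((k : Int) + 1)))) dp) x y
        = if 0 ≤ x ∧ x < (m : Int) ∧ y = x + 1 then (|g x - g (x + 1)|, min (g x) (g (x + 1)))
          else pvGet2 dp x y := by
  intro m
  induction m with
  | zero =>
    intro dp _ hsh
    refine ⟨by simpa using hsh, ?_⟩
    intro x y hx hy
    rw [List.range_zero, List.foldl_nil, if_neg (by omega)]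
  | succ m ih =>
    intro dp hm hsh
    obtain ⟨ihs, ihe⟩ := ih dp (by omega) hsh
    rw [List.range_succ, List.foldl_append, List.foldl_cons, List.foldl_nil]
    refine ⟨pvShape_set2 n _ _ _ _ ihs, ?_⟩
    intro x y hx hy
    rw [pvGet2_set2 n _ (m : Int) ((m : Int) + 1) x y _ ihs (by omega) (by omega) (by omega)
      (by omega) hx hy]
    by_cases hxm : x = (m : Int) ∧ y = (m : Int) + 1
    · rw [if_pos hxm, if_pos (by omega), hxm.1]
    · rw [if_neg hxm, ihe x y hx hy]
      by_cases hc : 0 ≤ x ∧ x < (m : Int) ∧ y = x + 1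
      · rw [if_pos hc, if_pos (by omega)]
      · rw [if_neg hc, if_neg (by omega)]

-- the bottom-up table invariant: all intervals of length ≤ L hold the recurrence value
def pvTb2 (g : Int → Int) (n L : Int) (dp : List (List (Int × Int))) : Prop :=
  ∀ l r : Int, 0 ≤ l → l ≤ r → r < n → r - l + 1 ≤ L → pvGet2 dp l r = pvG g l r

-- B's base table (after the two init loops) and its contents
lemma pvBase2 (g : Int → Int) (n : Int) (hn : 1 ≤ n) :
    pvShape n ((PySem.List.pyRange 0 (n - 1) 1).foldl
      (fun dp i => pvSet2 dp i (i + 1) (|g i - g (i + 1)|, min (g i) (g (i + 1))))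
      ((PySem.List.pyRange 0 n 1).foldl (fun dp i => pvSet2 dp i i (0, g i))
        ((PySem.List.pyRange 0 n 1).map
          (fun _ => (PySem.List.pyRange 0 n 1).map (fun _ => ((0 : Int), (0 : Int))))))) ∧
    pvTb2 g n 2 ((PySem.List.pyRange 0 (n - 1) 1).foldl
      (fun dp i => pvSet2 dp i (i + 1) (|g i - g (i + 1)|, min (g i) (g (i + 1))))
      ((PySem.List.pyRange 0 n 1).foldl (fun dp i => pvSet2 dp i i (0, g i))
        ((PySem.List.pyRange 0 n 1).map
          (fun _ => (PySem.List.pyRange 0 n 1).map (fun _ => ((0 : Int), (0 : Int))))))) := by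
  set dp0 := (PySem.List.pyRange 0 n 1).map
    (fun _ => (PySem.List.pyRange 0 n 1).map (fun _ => ((0 : Int), (0 : Int)))) with hdp0
  rw [PySem.List.pyRange_one 0 n, PySem.List.pyRange_one 0 (n - 1), List.foldl_map,
    List.foldl_map]
  simp only [zero_add, sub_zero]
  have hsh0 : pvShape n dp0 := by rw [hdp0]; exact pvShape_dp0 n
  obtain ⟨ds, de⟩ := pvFoldDiag2 g n (n.toNat) dp0 (by omega) hsh0
  obtain ⟨ps, pe⟩ := pvFoldPair2 g n ((n - 1).toNat) _ (by omega) ds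
  refine ⟨ps, ?_⟩
  intro l r hl hlr hr hlen
  rw [pe l r (by omega) (by omega)]
  have hc : r = l ∨ r = l + 1 := by omega
  rcases hc with h | h
  · rw [if_neg (by omega), de l r (by omega) (by omega), if_pos (by omega), pvG_diag g l r h]
  · rw [if_pos (by omega), pvG_pair g l r h, h]

-- B's inner row-fill step (length len, left end l), and the outer per-length step
def pvRowStep (len : Int) (dp : List (List (Int × Int))) (l : Int) : List (List (Int × Int)) :=
  pvSet2 dp l (l + len - 1) ((PySem.List.pyRange l (l + len - 1) 1).foldl (fun best k =>
    pvMin2 best ((pvGet2 dp l k).1 + (pvGet2 dp (k + 1) (l + len - 1)).1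
        + |(pvGet2 dp l k).2 - (pvGet2 dp (k + 1) (l + len - 1)).2|,
      min (pvGet2 dp l k).2 (pvGet2 dp (k + 1) (l + len - 1)).2)) (1000000, 10000))

def pvOuterStep (n len : Int) (dp : List (List (Int × Int))) : List (List (Int × Int)) :=
  (PySem.List.pyRange 0 (n - len + 1) 1).foldl (fun dp l => pvRowStep len dp l) dp

lemma pvRowStep_val (g : Int → Int) (n len l : Int) (dp : List (List (Int × Int)))
    (hTb : pvTb2 g n (len - 1) dp) (hl : 0 ≤ l) (hr : l + len - 1 < n) (h3 : 3 ≤ len) :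
    ((PySem.List.pyRange l (l + len - 1) 1).foldl (fun best k =>
      pvMin2 best ((pvGet2 dp l k).1 + (pvGet2 dp (k + 1) (l + len - 1)).1
          + |(pvGet2 dp l k).2 - (pvGet2 dp (k + 1) (l + len - 1)).2|,
        min (pvGet2 dp l k).2 (pvGet2 dp (k + 1) (l + len - 1)).2)) (1000000, 10000))
      = pvG g l (l + len - 1) := by
  rw [pvG_unfold g l (l + len - 1) (by omega)]
  apply PySem.List.foldl_congr_mem
  intro acc k hk
  rw [PySem.List.mem_pyRange_one] at hk
  rw [pvMin2_eq_stepA,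
    hTb l k hl hk.1 (by omega) (by omega),
    hTb (k + 1) (l + len - 1) (by omega) (by omega) (by omega) (by omega)]
  rfl

lemma pvRow (g : Int → Int) (n len : Int) (_hn : len ≤ n) (hlen : 3 ≤ len) :
    ∀ (t : Nat) (dp : List (List (Int × Int))), (t : Int) ≤ n - len + 1 →
      pvShape n dp → pvTb2 g n (len - 1) dp →
      (pvShape n ((List.range t).foldl (fun dp (l' : Nat) => pvRowStep len dp (l' : Int)) dp) ∧
       pvTb2 g n (len - 1) ((List.range t).foldl (fun dp (l' : Nat) => pvRowStep len dp (l' : Int)) dp)) ∧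
      ∀ l : Int, 0 ≤ l → l < (t : Int) →
        pvGet2 ((List.range t).foldl (fun dp (l' : Nat) => pvRowStep len dp (l' : Int)) dp)
          l (l + len - 1) = pvG g l (l + len - 1) := by
  intro t
  induction t with
  | zero =>
    intro dp _ hsh hTb
    exact ⟨⟨by simpa using hsh, by simpa using hTb⟩, fun l hl hlt => by omega⟩
  | succ t ih =>
    intro dp ht hsh hTb
    obtain ⟨⟨ih0, ih1⟩, ih2⟩ := ih dp (by omega) hsh hTb
    rw [List.range_succ, List.foldl_append, List.foldl_cons, List.foldl_nil]
    set P := (List.range t).foldl (fun dp (l' : Nat) => pvRowStep len dp (l' : Int)) dp with hP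
    have hbest := pvRowStep_val g n len (t : Int) P ih1 (by omega) (by omega) hlen
    have hget : ∀ a b : Int, 0 ≤ a → 0 ≤ b →
        pvGet2 (pvRowStep len P (t : Int)) a b
          = if a = (t : Int) ∧ b = (t : Int) + len - 1 then pvG g (t : Int) ((t : Int) + len - 1)
            else pvGet2 P a b := by
      intro a b ha hb
      unfold pvRowStep
      rw [pvGet2_set2 n P (t : Int) ((t : Int) + len - 1) a b _ ih0 (by omega) (by omega)
        (by omega) (by omega) ha hb, hbest]
    constructor
    · refine ⟨?_, ?_⟩
      · unfold pvRowStep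
        exact pvShape_set2 n P _ _ _ ih0
      · intro a b ha hab hbn hL
        rw [hget a b ha (by omega), if_neg (by omega)]
        exact ih1 a b ha hab hbn hL
    · intro l hl hlt
      rw [hget l (l + len - 1) hl (by omega)]
      by_cases hx : l = (t : Int)
      · rw [if_pos (by constructor <;> omega), hx]
      · rw [if_neg (by omega)]
        exact ih2 l hl (by omega)

lemma pvOuter (g : Int → Int) (n : Int) (_hn1 : 1 ≤ n)
    (dpB : List (List (Int × Int))) (hshB : pvShape n dpB) (hTbB : pvTb2 g n 2 dpB) :
    ∀ (M : Nat), (M = 0 ∨ (M : Int) + 2 ≤ n) →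
    pvShape n ((List.range M).foldl (fun dp (m : Nat) => pvOuterStep n (3 + (m : Int)) dp) dpB) ∧
    pvTb2 g n ((M : Int) + 2)
      ((List.range M).foldl (fun dp (m : Nat) => pvOuterStep n (3 + (m : Int)) dp) dpB) := by
  intro M
  induction M with
  | zero => intro _; exact ⟨by simpa using hshB, by simpa using hTbB⟩
  | succ M ih =>
    intro hM
    have hlen : (M : Int) + 3 ≤ n := by omega
    obtain ⟨pshape, prev⟩ := ih (by omega)
    rw [List.range_succ, List.foldl_append, List.foldl_cons, List.foldl_nil]
    set len : Int := 3 + (M : Int) with hlendef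
    set T := (List.range M).foldl (fun dp (m : Nat) => pvOuterStep n (3 + (m : Int)) dp) dpB
      with hT
    have hprev : pvTb2 g n (len - 1) T := by
      have he : len - 1 = (M : Int) + 2 := by omega
      rw [he]; exact prev
    unfold pvOuterStep
    rw [PySem.List.pyRange_one, List.foldl_map]
    simp only [zero_add, sub_zero]
    obtain ⟨⟨row0, row1⟩, row2⟩ := pvRow g n len (by omega) (by omega) ((n - len + 1).toNat) T
      (by omega) pshape hprev
    refine ⟨row0, ?_⟩
    intro l r hl hlr hr hL
    by_cases hshort : r - l + 1 ≤ len - 1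
    · exact row1 l r hl hlr hr hshort
    · have hexact : r = l + len - 1 := by omega
      have hw := row2 l hl (by omega)
      rw [hexact, hw]

lemma pvAlt_main (g : Int → Int) (n : Int) (hn : 1 ≤ n) :
    pvGet2 ((PySem.List.pyRange 3 (n + 1) 1).foldl (fun dp len =>
      (PySem.List.pyRange 0 (n - len + 1) 1).foldl (fun dp l =>
        let r := l + len - 1
        let best := (PySem.List.pyRange l r 1).foldl (fun best k =>
            let p := pvGet2 dp l k
            let q := pvGet2 dp (k + 1) r
            pvMin2 best (p.1 + q.1 + |p.2 - q.2|, min p.2 q.2)) ((1000000 : Int), (10000 : Int))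
        pvSet2 dp l r best) dp)
      ((PySem.List.pyRange 0 (n - 1) 1).foldl
        (fun dp i => pvSet2 dp i (i + 1) (|g i - g (i + 1)|, min (g i) (g (i + 1))))
        ((PySem.List.pyRange 0 n 1).foldl (fun dp i => pvSet2 dp i i (0, g i))
          ((PySem.List.pyRange 0 n 1).map
            (fun _ => (PySem.List.pyRange 0 n 1).map (fun _ => ((0 : Int), (0 : Int)))))))) 0 (n - 1)
      = pvG g 0 (n - 1) := by
  have hbody : (fun (dp : List (List (Int × Int))) (len : Int) =>
      (PySem.List.pyRange 0 (n - len + 1) 1).foldl (fun dp l =>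
        let r := l + len - 1
        let best := (PySem.List.pyRange l r 1).foldl (fun best k =>
            let p := pvGet2 dp l k
            let q := pvGet2 dp (k + 1) r
            pvMin2 best (p.1 + q.1 + |p.2 - q.2|, min p.2 q.2)) ((1000000 : Int), (10000 : Int))
        pvSet2 dp l r best) dp) = fun dp len => pvOuterStep n len dp := by
    funext dp len
    unfold pvOuterStep pvRowStep
    rfl
  rw [hbody, PySem.List.pyRange_one 3 (n + 1), List.foldl_map]
  obtain ⟨bs, bt⟩ := pvBase2 g n hn
  obtain ⟨_, hout⟩ := pvOuter g n hn _ bs bt ((n + 1 - 3).toNat) (by omega)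
  unfold pvTb2 at hout
  refine hout 0 (n - 1) ?_ ?_ ?_ ?_ <;> omega

-- ===== VERDICT (by name: the statement is the Claim_ definition above) =====
theorem solution_spec : Claim_unchanged_solution := by
  intro n ranks _ hPre
  unfold Spec_solution
  intro hD
  obtain ⟨hn1, hnlen⟩ := hPre
  have hNZ : pvNZ (fun i => PySem.List.pyGetD ranks i 0) n := by
    intro i h0 hin hgi0
    apply hD
    unfold D_solution
    have hi : i.toNat < ranks.length := by omega
    have hgi0' : PySem.List.pyGetD ranks i 0 = 0 := hgi0
    have hget : PySem.List.pyGetD ranks i 0 = ranks.getD i.toNat 0 := by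
      rw [show i = ((i.toNat : Nat) : Int) from by omega, PySem.List.pyGetD_natCast]
      rw [Int.toNat_natCast]
    have hval : ranks[i.toNat] = 0 := by
      rw [← List.getD_eq_getElem ranks 0 hi, ← hget]; exact hgi0'
    have hmem : ranks[i.toNat] ∈ ranks.take n.toNat := by
      have hlt : i.toNat < (ranks.take n.toNat).length := by simp; omega
      have : (ranks.take n.toNat)[i.toNat]'hlt = ranks[i.toNat] := List.getElem_take
      rw [← this]
      exact List.getElem_mem hlt
    rw [← hval]
    exact hmem
  have hA := (pvFuncA_main (fun i => PySem.List.pyGetD ranks i 0) n hNZ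
    ((n - 1).toNat + 1) 0 (n - 1) (pvInitA (fun i => PySem.List.pyGetD ranks i 0) n)
    le_rfl (by omega) (by omega) (by omega)
    (pvInv_init (fun i => PySem.List.pyGetD ranks i 0) n)).1
  have hB := pvAlt_main (fun i => PySem.List.pyGetD ranks i 0) n hn1
  show (pvFuncA ((n - 1).toNat + 1)
      (pvInitA (fun i => PySem.List.pyGetD ranks i 0) n) 0 (n - 1)).2.1 = _
  rw [hA]
  exact (congrArg Prod.fst hB).symm

theorem solution_changed : Claim_changed_solution := by
  unfold Claim_changed_solution; decide
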